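-- pv_equiv track=rewrite | github.com/mtinti/streamlit_fly_app | utils/sequence_processing.py | parse_multi_fasta
-- ===== SOURCE A (Python) =====
-- def parse_multi_fasta(fasta_string):
--     """
--     Parse a multi-FASTA format string containing multiple protein sequences.
--
--     Parameters
--     ----------
--     fasta_string : str
--         Multi-FASTA format string
--
--     Returns
--     -------
--     list of tuple
--         List of (protein_id, sequence) tuples
--
--     Examples
--     --------
--     >>> fasta = ">Protein1\\nMVLSPADK\\n>Protein2\\nACDEFGH"
--     >>> proteins = parse_multi_fasta(fasta)
--     >>> len(proteins)
--     2
--     """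
--     proteins = []
--     current_id = None
--     current_seq = []
--
--     for line in fasta_string.strip().split('\n'):
--         line = line.strip()
--         if line.startswith('>'):
--             # Save previous protein if exists
--             if current_id is not None:
--                 proteins.append((current_id, ''.join(current_seq).upper()))
--             # Start new protein
--             current_id = line[1:]
--             current_seq = []
--         else:
--             # Accumulate sequence
--             current_seq.append(line.replace(' ', ''))
--
--     # Save last protein
--     if current_id is not None:
--         proteins.append((current_id, ''.join(current_seq).upper()))
--
--     return proteins
-- ===== SOURCE B (Python) =====
-- def parse_multi_fasta(fasta_string):
--     """Parse a multi-FASTA string into (id, sequence) tuples.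
--
--     Span-based decomposition: pre-strip all lines, skip anything before the
--     first header, then repeatedly consume one header plus its run of
--     sequence lines.
--     """
--     lines = [l.strip() for l in fasta_string.strip().split('\n')]
--     i = 0
--     while i < len(lines) and not lines[i].startswith('>'):
--         i += 1
--     proteins = []
--     while i < len(lines):
--         header = lines[i]
--         j = i + 1
--         while j < len(lines) and not lines[j].startswith('>'):
--             j += 1
--         seq = ''.join(l.replace(' ', '') for l in lines[i + 1:j])
--         proteins.append((header[1:], seq.upper()))
--         i = j
--     return proteins
-- ===== Notes on version B (the rewrite author's own statement) =====
-- stated objective: alternative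
-- what changed: Replaces A's stateful accumulator loop (current_id sentinel plus running sequence buffer flushed at each header and at the end) by a span-based grouping: strip all lines once, skip lines before the first header, then repeatedly consume one header and its run of non-header lines.
import Mathlib
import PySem

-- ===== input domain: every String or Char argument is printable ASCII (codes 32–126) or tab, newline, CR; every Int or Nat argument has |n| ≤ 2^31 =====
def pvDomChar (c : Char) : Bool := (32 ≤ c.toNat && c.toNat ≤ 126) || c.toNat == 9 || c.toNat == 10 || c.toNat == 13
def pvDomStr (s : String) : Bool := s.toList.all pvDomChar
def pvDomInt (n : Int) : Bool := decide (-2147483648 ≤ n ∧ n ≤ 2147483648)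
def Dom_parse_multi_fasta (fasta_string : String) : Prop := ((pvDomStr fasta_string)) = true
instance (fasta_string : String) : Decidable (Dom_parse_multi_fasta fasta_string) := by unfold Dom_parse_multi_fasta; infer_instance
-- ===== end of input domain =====

-- B replaces A's accumulator loop (current_id sentinel + running seq buffer) by a
-- span-based grouping over the pre-stripped line list; objective: alternative decomposition.

-- ===== PORT A =====
-- state = (proteins, current_id, current_seq); one fold step per line, as in A's for-loop
def pvStepA (st : List (String × String) × Option String × List String) (rawLine : String) :
    List (String × String) × Option String × List String :=
  let line := PySem.Str.strip rawLine
  if PySem.Str.startswith line ">" then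
    let proteins :=
      match st.2.1 with
      | some cid => st.1 ++ [(cid, PySem.Str.upper (PySem.Str.join "" st.2.2))]
      | none => st.1
    (proteins, some (PySem.Str.slice line (some 1) none), [])
  else
    (st.1, st.2.1, st.2.2 ++ [PySem.Str.replace line " " ""])

def parse_multi_fasta (fasta_string : String) : List (String × String) :=
  -- '\n' ≠ "" so split? is always `some`; getD only unwraps it
  let lines := (PySem.Str.split? (PySem.Str.strip fasta_string) "\n").getD []
  let fin := lines.foldl pvStepA ([], none, [])
  match fin.2.1 with
  | some cid => fin.1 ++ [(cid, PySem.Str.upper (PySem.Str.join "" fin.2.2))]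
  | none => fin.1

-- ===== PORT B =====
def pvIsHeader (l : String) : Bool := PySem.Str.startswith l ">"

-- consume one header and its run of non-header lines, then recurse (B's outer while)
def pvGroups : List String → List (String × String)
  | [] => []
  | l :: ls =>
    if pvIsHeader l then
      let seqLines := ls.takeWhile (fun x => !pvIsHeader x)
      (PySem.Str.slice l (some 1) none,
        PySem.Str.upper (PySem.Str.join "" (seqLines.map (fun x => PySem.Str.replace x " " "")))) ::
        pvGroups (ls.dropWhile (fun x => !pvIsHeader x))
    else
      -- B's leading skip loop: drop lines before the first header
      pvGroups ls
  termination_by l => l.length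
  decreasing_by
    · exact Nat.lt_succ_of_le (List.length_dropWhile_le _ _)
    · simp

def parse_multi_fasta_alt (fasta_string : String) : List (String × String) :=
  let lines := ((PySem.Str.split? (PySem.Str.strip fasta_string) "\n").getD []).map PySem.Str.strip
  pvGroups lines

-- ===== PRECONDITION & SPEC =====
def Spec_parse_multi_fasta (fasta_string : String) (out : List (String × String)) : Prop := out = parse_multi_fasta_alt fasta_string
instance (fasta_string : String) (out : List (String × String)) : Decidable (Spec_parse_multi_fasta fasta_string out) := by unfold Spec_parse_multi_fasta; infer_instance

-- ===== CLAIM (what is proved, stated in full; the proofs are below) =====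
def Claim_equal_parse_multi_fasta : Prop := ∀ (fasta_string : String), Dom_parse_multi_fasta fasta_string → Spec_parse_multi_fasta fasta_string (parse_multi_fasta fasta_string)

-- ===== LEMMAS AND PROOFS =====

def pvFin (st : List (String × String) × Option String × List String) : List (String × String) :=
  match st.2.1 with
  | some cid => st.1 ++ [(cid, PySem.Str.upper (PySem.Str.join "" st.2.2))]
  | none => st.1

lemma pvGroups_nil : pvGroups [] = [] := by simp [pvGroups]

lemma pvGroups_cons_header (l : String) (ls : List String) (h : pvIsHeader l = true) :
    pvGroups (l :: ls) =
      (PySem.Str.slice l (some 1) none,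
        PySem.Str.upper (PySem.Str.join ""
          ((ls.takeWhile (fun x => !pvIsHeader x)).map (fun x => PySem.Str.replace x " " "")))) ::
        pvGroups (ls.dropWhile (fun x => !pvIsHeader x)) := by
  rw [pvGroups]
  simp [h]

lemma pvGroups_cons_nonheader (l : String) (ls : List String) (h : pvIsHeader l = false) :
    pvGroups (l :: ls) = pvGroups ls := by
  rw [pvGroups]
  simp [h]

-- A's fold started in a `some cid` state; B views the stripped remainder as one span
lemma pvFold_some (lines : List String) (ps : List (String × String)) (cid : String)
    (seq : List String) :
    pvFin (lines.foldl pvStepA (ps, some cid, seq)) =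
      ps ++ (cid, PySem.Str.upper (PySem.Str.join ""
              (seq ++ ((lines.map PySem.Str.strip).takeWhile (fun x => !pvIsHeader x)).map
                        (fun x => PySem.Str.replace x " " "")))) ::
        pvGroups ((lines.map PySem.Str.strip).dropWhile (fun x => !pvIsHeader x)) := by
  induction lines generalizing ps cid seq with
  | nil => simp [pvFin, pvGroups_nil]
  | cons h t ih =>
    cases hd : pvIsHeader (PySem.Str.strip h) with
    | true =>
      have : (PySem.Str.startswith (PySem.Str.strip h) ">") = true := hd
      simp only [List.foldl_cons, pvStepA, this, if_true, List.map_cons,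
        List.takeWhile_cons, List.dropWhile_cons, hd, Bool.not_true, Bool.false_eq_true,
        if_false, ih]
      rw [pvGroups_cons_header _ _ hd]
      simp
    | false =>
      have : (PySem.Str.startswith (PySem.Str.strip h) ">") = false := hd
      simp only [List.foldl_cons, pvStepA, this, Bool.false_eq_true, if_false,
        List.map_cons, List.takeWhile_cons, List.dropWhile_cons, hd, Bool.not_false,
        if_true, ih]
      simp

-- A's fold started in the initial `none` state computes B's grouping of the stripped lines
lemma pvFold_none (lines : List String) (ps : List (String × String)) (seq : List String) :
    pvFin (lines.foldl pvStepA (ps, none, seq)) = ps ++ pvGroups (lines.map PySem.Str.strip) := by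
  induction lines generalizing seq with
  | nil => simp [pvFin, pvGroups_nil]
  | cons h t ih =>
    cases hd : pvIsHeader (PySem.Str.strip h) with
    | true =>
      have : (PySem.Str.startswith (PySem.Str.strip h) ">") = true := hd
      simp only [List.foldl_cons, pvStepA, this, if_true, List.map_cons]
      rw [pvFold_some, pvGroups_cons_header _ _ hd]
      simp
    | false =>
      have : (PySem.Str.startswith (PySem.Str.strip h) ">") = false := hd
      simp only [List.foldl_cons, pvStepA, this, Bool.false_eq_true, if_false,
        List.map_cons, ih]
      rw [pvGroups_cons_nonheader _ _ hd]

-- ===== VERDICT (by name: the statement is the Claim_ definition above) =====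
theorem parse_multi_fasta_spec : Claim_equal_parse_multi_fasta := by
  intro s _
  show parse_multi_fasta s = parse_multi_fasta_alt s
  have := pvFold_none ((PySem.Str.split? (PySem.Str.strip s) "\n").getD []) [] []
  simpa [parse_multi_fasta, parse_multi_fasta_alt, pvFin] using this
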